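-- pv_equiv track=rewrite | github.com/rubelw/OSSS | src/OSSS/ai/agents/query_data/handlers/proposal_documents_handler.py | _select_fieldnames
-- ===== SOURCE A (Python) =====
-- from typing import Any, Dict, List, Sequence
--
-- def _select_fieldnames(rows: Sequence[Dict[str, Any]]) -> List[str]:
--     """
--     Derive a stable field order for proposal_documents.
--     """
--     if not rows:
--         return []
--
--     preferred_order = [
--         "id",
--         "proposal_id",
--         "document_name",
--         "document_type",
--         "file_name",
--         "status",
--         "created_at",
--         "updated_at",
--     ]
--
--     all_keys: List[str] = []
--     for r in rows:
--         for k in r.keys():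
--             if k not in all_keys:
--                 all_keys.append(k)
--
--     ordered: List[str] = []
--     for col in preferred_order:
--         if col in all_keys:
--             ordered.append(col)
--
--     for col in all_keys:
--         if col not in ordered:
--             ordered.append(col)
--
--     return ordered
-- ===== SOURCE B (Python) =====
-- from typing import Any, Dict, List, Sequence
--
-- def _select_fieldnames(rows: Sequence[Dict[str, Any]]) -> List[str]:
--     """
--     Derive a stable field order for proposal_documents.
--
--     Rank-table + stable sort: collect unique keys in first-seen order in one
--     pass, then sort them by each key's rank in the preferred order (unknown
--     keys rank last and keep first-seen order by sort stability).
--     """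
--     if not rows:
--         return []
--
--     preferred = [
--         "id",
--         "proposal_id",
--         "document_name",
--         "document_type",
--         "file_name",
--         "status",
--         "created_at",
--         "updated_at",
--     ]
--     rank = {k: i for i, k in enumerate(preferred)}
--
--     seen = set()
--     all_keys: List[str] = []
--     for r in rows:
--         for k in r.keys():
--             if k not in seen:
--                 seen.add(k)
--                 all_keys.append(k)
--
--     return sorted(all_keys, key=lambda k: rank.get(k, len(preferred)))
-- ===== Notes on version B (the rewrite author's own statement) =====
-- stated objective: faster
-- what changed: Replaces A's two explicit filter-and-append scans (preferred keys first, then leftovers re-checked against the growing 'ordered' list) by a rank table built once from preferred_order plus one stable sort of the first-seen unique keys, whose stability keeps non-preferred keys in first-seen order; key collection uses a seen-set instead of repeated list membership scans.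
import Mathlib
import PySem

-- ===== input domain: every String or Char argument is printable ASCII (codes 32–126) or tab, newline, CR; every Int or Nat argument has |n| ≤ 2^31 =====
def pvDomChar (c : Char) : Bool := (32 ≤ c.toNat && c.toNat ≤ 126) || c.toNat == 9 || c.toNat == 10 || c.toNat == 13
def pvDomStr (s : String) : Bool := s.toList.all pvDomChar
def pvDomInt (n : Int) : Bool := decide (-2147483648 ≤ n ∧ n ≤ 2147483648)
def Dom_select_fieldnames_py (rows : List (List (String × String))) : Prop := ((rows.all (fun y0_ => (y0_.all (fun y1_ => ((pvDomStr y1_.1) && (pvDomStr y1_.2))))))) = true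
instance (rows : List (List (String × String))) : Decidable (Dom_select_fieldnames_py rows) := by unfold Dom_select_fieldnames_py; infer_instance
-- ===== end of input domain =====

-- B replaces A's two filter-and-append scans by a rank table plus one stable sort of the
-- first-seen unique keys, dropping the quadratic membership scans (objective: faster, measured);
-- equal return value proved on all inputs.

-- ===== PORT A =====
def select_fieldnames_py (rows : List (List (String × String))) : List String :=
  if rows = [] then []
  else
    let preferred_order : List String :=
      ["id", "proposal_id", "document_name", "document_type",
       "file_name", "status", "created_at", "updated_at"]
    -- for r in rows: for k in r.keys(): if k not in all_keys: all_keys.append(k)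
    let all_keys : List String :=
      rows.foldl (fun acc r =>
        r.foldl (fun acc kv => if kv.1 ∈ acc then acc else acc ++ [kv.1]) acc) []
    -- for col in preferred_order: if col in all_keys: ordered.append(col)
    let ordered : List String :=
      preferred_order.foldl (fun o col => if col ∈ all_keys then o ++ [col] else o) []
    -- for col in all_keys: if col not in ordered: ordered.append(col)
    all_keys.foldl (fun o col => if col ∈ o then o else o ++ [col]) ordered

-- ===== PORT B =====
def select_fieldnames_py_alt (rows : List (List (String × String))) : List String :=
  if rows = [] then []
  else
    let preferred : List String :=
      ["id", "proposal_id", "document_name", "document_type",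
       "file_name", "status", "created_at", "updated_at"]
    -- rank = {k: i for i, k in enumerate(preferred)}
    let rank : PySem.Dict String Int :=
      (PySem.List.enumerate preferred).foldl (fun d ik => d.insert ik.2 ik.1) PySem.Dict.empty
    -- one pass with a seen-set collecting unique keys in first-seen order
    let st : PySem.Set String × List String :=
      rows.foldl (fun (st : PySem.Set String × List String) r =>
        r.foldl (fun (st : PySem.Set String × List String) kv =>
          if PySem.Set.contains st.1 kv.1 then st
          else (PySem.Set.add st.1 kv.1, st.2 ++ [kv.1])) st) (PySem.Set.empty, [])
    -- sorted(all_keys, key=lambda k: rank.get(k, len(preferred)))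
    PySem.List.sorted st.2 (fun k => rank.getD k ((preferred.length : Nat) : Int)) false

-- ===== PRECONDITION & SPEC =====
def Spec_select_fieldnames_py (rows : List (List (String × String))) (out : List String) : Prop := out = select_fieldnames_py_alt rows
instance (rows : List (List (String × String))) (out : List String) : Decidable (Spec_select_fieldnames_py rows out) := by unfold Spec_select_fieldnames_py; infer_instance

-- ===== CLAIM (what is proved, stated in full; the proofs are below) =====
def Claim_equal_select_fieldnames_py : Prop := ∀ (rows : List (List (String × String))), Dom_select_fieldnames_py rows → Spec_select_fieldnames_py rows (select_fieldnames_py rows)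

-- ===== LEMMAS AND PROOFS =====

def pvPref : List String :=
  ["id", "proposal_id", "document_name", "document_type",
   "file_name", "status", "created_at", "updated_at"]

def pvRank : PySem.Dict String Int :=
  (PySem.List.enumerate pvPref).foldl (fun d ik => d.insert ik.2 ik.1) PySem.Dict.empty

def pvKey (k : String) : Int := pvRank.getD k ((pvPref.length : Nat) : Int)

def pvBef (a b : String) : Bool := decide (pvKey a < pvKey b)

def pvStepA (acc : List String) (kv : String × String) : List String :=
  if kv.1 ∈ acc then acc else acc ++ [kv.1]

def pvStepB (st : PySem.Set String × List String) (kv : String × String) :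
    PySem.Set String × List String :=
  if PySem.Set.contains st.1 kv.1 then st else (PySem.Set.add st.1 kv.1, st.2 ++ [kv.1])

def pvKeysA (rows : List (List (String × String))) : List String :=
  rows.foldl (fun acc r => r.foldl pvStepA acc) []

def pvOrderedA (K : List String) : List String :=
  K.foldl (fun o col => if col ∈ o then o else o ++ [col])
    (pvPref.foldl (fun o col => if col ∈ K then o ++ [col] else o) [])

-- target shape: preferred keys present in P, in preferred order, then the rest in P's order
def pvT (P : List String) : List String :=
  pvPref.filter (fun c => decide (c ∈ P)) ++ P.filter (fun c => decide (c ∉ pvPref))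

theorem pvA_eq (rows : List (List (String × String))) :
    select_fieldnames_py rows = if rows = [] then [] else pvOrderedA (pvKeysA rows) := rfl

theorem pvB_eq (rows : List (List (String × String))) :
    select_fieldnames_py_alt rows =
      if rows = [] then []
      else
        PySem.List.sorted
          ((rows.foldl (fun st r => r.foldl pvStepB st) ((PySem.Set.empty : PySem.Set String), ([] : List String))).2)
          pvKey false := rfl

-- B's seen-set/list pair stays on the diagonal and its list component is A's all_keys
theorem pv_step_diag (l : List String) (kv : String × String) :
    pvStepB (l, l) kv = (pvStepA l kv, pvStepA l kv) := by
  by_cases h : kv.1 ∈ l <;>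
    simp [pvStepB, pvStepA, PySem.Set.contains, PySem.Set.add, h]

theorem pv_diag_inner (r : List (String × String)) (l : List String) :
    r.foldl pvStepB (l, l) = (r.foldl pvStepA l, r.foldl pvStepA l) := by
  induction r generalizing l with
  | nil => rfl
  | cons kv r ih => rw [List.foldl_cons, List.foldl_cons, pv_step_diag]; exact ih _

theorem pv_diag (rows : List (List (String × String))) (l : List String) :
    rows.foldl (fun st r => r.foldl pvStepB st) (l, l)
      = (rows.foldl (fun acc r => r.foldl pvStepA acc) l,
         rows.foldl (fun acc r => r.foldl pvStepA acc) l) := by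
  induction rows generalizing l with
  | nil => rfl
  | cons r rows ih =>
    rw [List.foldl_cons, List.foldl_cons, pv_diag_inner]
    exact ih _

-- the collected key list has no duplicates
theorem pv_nodup_inner (r : List (String × String)) (acc : List String) (h : acc.Nodup) :
    (r.foldl pvStepA acc).Nodup := by
  induction r generalizing acc with
  | nil => exact h
  | cons kv r ih =>
    rw [List.foldl_cons]
    refine ih _ ?_
    by_cases hm : kv.1 ∈ acc
    · simpa [pvStepA, hm] using h
    · have hn : (acc ++ [kv.1]).Nodup := by
        simp [List.nodup_append, h]
        exact fun a ha hak => hm (hak ▸ ha)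
      simpa [pvStepA, hm] using hn

theorem pvKeysA_nodup (rows : List (List (String × String))) : (pvKeysA rows).Nodup := by
  unfold pvKeysA
  generalize hacc : ([] : List String) = acc
  have h : acc.Nodup := hacc ▸ List.nodup_nil
  clear hacc
  induction rows generalizing acc with
  | nil => exact h
  | cons r rows ih => exact ih _ (pv_nodup_inner r acc h)

-- A's first output loop is a filter
theorem pv_fold1 (pr L : List String) : ∀ o0 : List String,
    pr.foldl (fun o col => if col ∈ L then o ++ [col] else o) o0
      = o0 ++ pr.filter (fun c => decide (c ∈ L)) := by
  induction pr with
  | nil => simp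
  | cons c pr ih =>
    intro o0
    by_cases h : c ∈ L <;> simp [List.foldl_cons, h, ih]

-- A's second output loop appends the not-yet-present elements of a nodup list
theorem pv_fold2 (K : List String) : ∀ o0 : List String, K.Nodup →
    K.foldl (fun o col => if col ∈ o then o else o ++ [col]) o0
      = o0 ++ K.filter (fun c => decide (c ∉ o0)) := by
  induction K with
  | nil => simp
  | cons c K ih =>
    intro o0 h
    have hcK : c ∉ K := (List.nodup_cons.mp h).1
    have hK : K.Nodup := (List.nodup_cons.mp h).2
    by_cases hc : c ∈ o0
    · simp [List.foldl_cons, hc, ih o0 hK]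
    · simp [List.foldl_cons, hc, ih (o0 ++ [c]) hK]
      refine List.filter_congr ?_
      intro y hy
      have : y ≠ c := fun hyc => hcK (hyc ▸ hy)
      simp [this]

theorem pvOrderedA_eq_T (K : List String) (hK : K.Nodup) : pvOrderedA K = pvT K := by
  unfold pvOrderedA pvT
  rw [pv_fold1, List.nil_append, pv_fold2 K _ hK]
  congr 1
  refine List.filter_congr ?_
  intro y hy
  by_cases h : y ∈ pvPref <;> simp [List.mem_filter, h, hy]

-- key facts about the rank table
theorem pv_pairwise : pvPref.Pairwise (fun a b => pvKey a < pvKey b) := by decide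

theorem pv_key_mem (y : String) (h : y ∈ pvPref) : pvKey y < 8 := by
  fin_cases h <;> decide

theorem pvRank_keys : pvRank.keys = pvPref := by decide

theorem pv_key_notmem (y : String) (h : y ∉ pvPref) : pvKey y = 8 := by
  have hn : pvRank.get? y = none :=
    (PySem.Dict.get?_eq_none_iff_not_mem_keys pvRank y).mpr (by rw [pvRank_keys]; exact h)
  simp [pvKey, PySem.Dict.getD, hn, pvPref]

theorem pv_key_le (y : String) : pvKey y ≤ 8 := by
  by_cases h : y ∈ pvPref
  · exact le_of_lt (pv_key_mem y h)
  · exact le_of_eq (pv_key_notmem y h)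

-- stable insertion of a preferred key lands at its rank position
theorem pv_ins_pref (x : String) : ∀ (pr P R : List String),
    pr.Pairwise (fun a b => pvKey a < pvKey b) → x ∈ pr → x ∉ P →
    (∀ y ∈ R, pvKey x < pvKey y) →
    PySem.List.insertBy pvBef x (pr.filter (fun c => decide (c ∈ P)) ++ R)
      = pr.filter (fun c => decide (c ∈ P ++ [x])) ++ R := by
  intro pr
  induction pr with
  | nil => intro P R _ hx; exact absurd hx (List.not_mem_nil)
  | cons p pr ih =>
    intro P R hpw hx hxP hR
    have hp : ∀ y ∈ pr, pvKey p < pvKey y := (List.pairwise_cons.mp hpw).1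
    have hpw' : pr.Pairwise (fun a b => pvKey a < pvKey b) := (List.pairwise_cons.mp hpw).2
    by_cases hxp : x = p
    · subst hxp
      have hfilt : pr.filter (fun c => decide (c ∈ P ++ [x])) = pr.filter (fun c => decide (c ∈ P)) := by
        refine List.filter_congr ?_
        intro y hy
        have : y ≠ x := fun h => absurd (h ▸ hp y hy) (lt_irrefl _)
        simp [List.mem_append, this]
      rw [List.filter_cons, if_neg (by simpa using hxP),
          List.filter_cons, if_pos (by simp : (decide (x ∈ P ++ [x])) = true),
          hfilt]
      cases hc : pr.filter (fun c => decide (c ∈ P)) ++ R with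
      | nil =>
        rcases List.append_eq_nil_iff.mp hc with ⟨h1, h2⟩
        rw [h1, h2]
        simp [PySem.List.insertBy]
      | cons z zs =>
        have hz : pvBef x z = true := by
          have hzm : z ∈ pr.filter (fun c => decide (c ∈ P)) ++ R := hc ▸ List.mem_cons_self
          rcases List.mem_append.mp hzm with hzm | hzm
          · exact decide_eq_true (hp z (List.mem_of_mem_filter hzm))
          · exact decide_eq_true (hR z hzm)
        simp only [PySem.List.insertBy, hz, if_true]
        rw [← hc]
        simp
    · have hx' : x ∈ pr := by
        rcases List.mem_cons.mp hx with h | h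
        · exact absurd h hxp
        · exact h
      by_cases hpP : p ∈ P
      · have hbef : pvBef x p = false := by
          have := hp x hx'
          simp only [pvBef, decide_eq_false_iff_not]; omega
        rw [List.filter_cons, if_pos (by simpa using hpP), List.filter_cons,
            if_pos (by simp [List.mem_append, hpP])]
        rw [List.cons_append]
        simp only [PySem.List.insertBy, hbef]
        rw [if_neg (by simp), ih P R hpw' hx' hxP hR, List.cons_append]
      · have hpx : p ≠ x := fun h => hxp h.symm
        have hpPx : p ∉ P ++ [x] := by
          simp [List.mem_append, hpP, hpx]
        rw [List.filter_cons, if_neg (by simpa using hpP), List.filter_cons,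
            if_neg (by simpa using hpPx)]
        exact ih P R hpw' hx' hxP hR

-- inserting the next first-seen key into the target shape keeps the target shape
theorem pvT_step (x : String) (P : List String) (hx : x ∉ P) :
    PySem.List.insertBy pvBef x (pvT P) = pvT (P ++ [x]) := by
  by_cases hpref : x ∈ pvPref
  · unfold pvT
    have hR : ∀ y ∈ P.filter (fun c => decide (c ∉ pvPref)), pvKey x < pvKey y := by
      intro y hy
      have hyn : y ∉ pvPref := by simpa using List.of_mem_filter hy
      rw [pv_key_notmem y hyn]
      exact pv_key_mem x hpref
    rw [pv_ins_pref x pvPref P _ pv_pairwise hpref hx hR]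
    congr 1
    rw [List.filter_append]
    simp [hpref]
  · have hall : ∀ y ∈ pvT P, pvBef x y = false := by
      intro y _
      have := pv_key_le y
      rw [pvBef, pv_key_notmem x hpref]
      simp only [decide_eq_false_iff_not]; omega
    rw [PySem.List.insertBy_of_forall_not_before pvBef x (pvT P) hall]
    unfold pvT
    have hfilt : pvPref.filter (fun c => decide (c ∈ P ++ [x])) = pvPref.filter (fun c => decide (c ∈ P)) := by
      refine List.filter_congr ?_
      intro y hy
      have : y ≠ x := fun h => hpref (h ▸ hy)
      simp [List.mem_append, this]
    rw [hfilt, List.filter_append, List.append_assoc]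
    congr 1
    simp [hpref]

theorem pvT_fold : ∀ (K P : List String), (P ++ K).Nodup →
    K.foldl (fun acc x => PySem.List.insertBy pvBef x acc) (pvT P) = pvT (P ++ K) := by
  intro K
  induction K with
  | nil => intro P _; simp
  | cons x K ih =>
    intro P h
    have h' : ((P ++ [x]) ++ K).Nodup := by simpa [List.append_assoc] using h
    have hx : x ∉ P := by
      rw [List.nodup_append] at h
      exact fun hxP => h.2.2 x hxP x List.mem_cons_self rfl
    rw [List.foldl_cons, pvT_step x P hx, ih (P ++ [x]) h']
    simp [List.append_assoc]

theorem pv_sorted_eq_T (K : List String) (hK : K.Nodup) :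
    PySem.List.sorted K pvKey false = pvT K := by
  rw [PySem.List.sorted_eq_foldl_insertBy]
  have h0 : pvT [] = [] := by simp [pvT]
  have hb : (fun (acc : List String) x => PySem.List.insertBy (fun a b => decide (pvKey a < pvKey b)) x acc)
       = (fun acc x => PySem.List.insertBy pvBef x acc) := rfl
  rw [hb, ← h0]
  simpa using pvT_fold K [] (by simpa using hK)

-- ===== VERDICT (by name: the statement is the Claim_ definition above) =====
theorem select_fieldnames_py_spec : Claim_equal_select_fieldnames_py := by
  intro rows _
  unfold Spec_select_fieldnames_py
  rw [pvA_eq, pvB_eq]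
  by_cases h : rows = []
  · simp [h]
  · rw [if_neg h, if_neg h]
    rw [show ((PySem.Set.empty : PySem.Set String), ([] : List String))
          = (([] : List String), ([] : List String)) from rfl, pv_diag rows []]
    have hK : (pvKeysA rows).Nodup := pvKeysA_nodup rows
    rw [show (rows.foldl (fun acc r => r.foldl pvStepA acc) [] : List String) = pvKeysA rows from rfl]
    rw [pv_sorted_eq_T (pvKeysA rows) hK, pvOrderedA_eq_T (pvKeysA rows) hK]
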